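-- pv_equiv track=rewrite | github.com/haolunc/ARC-RL | reference_solutions/solutions/a68b268e.py | transform
-- ===== SOURCE A (Python) =====
-- def transform(grid):
--
--     n = len(grid)
--     center = n // 2
--     size = center
--
--     out = [[0] * size for _ in range(size)]
--
--     for i in range(size):
--         for j in range(size):
--
--             tl = grid[i][j]
--             tr = grid[i][center + 1 + j]
--             bl = grid[center + 1 + i][j]
--             br = grid[center + 1 + i][center + 1 + j]
--
--             for val in (tl, tr, bl, br):
--                 if val != 0:
--                     out[i][j] = val
--                     break
--
--     return out
-- ===== SOURCE B (Python) =====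
-- def transform(grid):
--     n = len(grid)
--     c = n // 2
--     s = c
--     out = [row[:s] for row in grid[:s]]
--     for di, dj in ((0, c + 1), (c + 1, 0), (c + 1, c + 1)):
--         out = [[v if v != 0 else grid[di + i][dj + j] for j, v in enumerate(row)]
--                for i, row in enumerate(out)]
--     return out
-- ===== Notes on version B (the rewrite author's own statement) =====
-- stated objective: alternative
-- what changed: A fills each output cell in one nested loop with an inner first-nonzero scan over (tl, tr, bl, br); B instead copies the top-left quadrant wholesale (grid[:s] row slices) and then runs three separate whole-grid overlay passes (tr, bl, br in order), each filling only the cells still zero.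
import Mathlib
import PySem

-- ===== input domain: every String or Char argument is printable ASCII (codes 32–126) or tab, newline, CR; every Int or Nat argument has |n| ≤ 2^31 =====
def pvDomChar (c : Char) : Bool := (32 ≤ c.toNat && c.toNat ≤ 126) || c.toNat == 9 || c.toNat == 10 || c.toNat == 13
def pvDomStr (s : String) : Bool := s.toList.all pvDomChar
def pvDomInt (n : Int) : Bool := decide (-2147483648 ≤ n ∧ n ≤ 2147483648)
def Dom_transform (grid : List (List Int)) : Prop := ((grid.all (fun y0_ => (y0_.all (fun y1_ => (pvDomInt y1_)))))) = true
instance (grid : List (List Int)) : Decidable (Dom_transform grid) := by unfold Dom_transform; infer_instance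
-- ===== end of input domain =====

-- B rebuilds the result as a copy of the top-left quadrant followed by three whole-grid
-- zero-filling overlay passes (tr, bl, br) instead of A's single nested loop with an
-- inner first-nonzero scan per cell; same values, different decomposition (objective: alternative).

-- shared indexing helper: grid[i][j]; pyGetD's default is never read under Pre_transform
-- (Python raises IndexError exactly on the inputs Pre_transform excludes)
def pvG2 (grid : List (List Int)) (i j : Int) : Int :=
  PySem.List.pyGetD (PySem.List.pyGetD grid i []) j 0

-- ===== PORT A =====
-- inner `for val in (tl, tr, bl, br): if val != 0: out[i][j] = val; break`:
-- first element of the tuple with val != 0 is written, else no write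
def pvInner (grid : List (List Int)) (center i : Nat) (out : List (List Int)) (j : Nat) :
    List (List Int) :=
  let tl := pvG2 grid i j
  let tr := pvG2 grid i (center + 1 + j)
  let bl := pvG2 grid (center + 1 + i) j
  let br := pvG2 grid (center + 1 + i) (center + 1 + j)
  match [tl, tr, bl, br].find? (fun v => decide (v ≠ 0)) with
  | some v => out.modify i (fun row => row.set j v)
  | none => out

def pvOuter (grid : List (List Int)) (center : Nat) (out : List (List Int)) (i : Nat) :
    List (List Int) :=
  (List.range center).foldl (pvInner grid center i) out

def transform (grid : List (List Int)) : List (List Int) :=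
  let n := grid.length
  let center := n / 2
  let size := center
  let out0 := (List.range size).map (fun _ => List.replicate size (0 : Int))
  (List.range size).foldl (pvOuter grid center) out0

-- ===== PORT B =====
-- one overlay pass: fill every still-zero cell of `out` from the quadrant at offset p
def pvOverlay (grid : List (List Int)) (p : Int × Int) (out : List (List Int)) :
    List (List Int) :=
  (PySem.List.enumerate out).map (fun ir =>
    (PySem.List.enumerate ir.2).map (fun jv =>
      if jv.2 ≠ 0 then jv.2 else pvG2 grid (p.1 + ir.1) (p.2 + jv.1)))

def transform_alt (grid : List (List Int)) : List (List Int) :=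
  let n := grid.length
  let c := n / 2
  let s := c
  let out0 := (PySem.List.slice grid none (some (s : Int))).map
    (fun row => PySem.List.slice row none (some (s : Int)))
  ([((0 : Int), (c : Int) + 1), ((c : Int) + 1, 0), ((c : Int) + 1, (c : Int) + 1)]).foldl
    (fun out p => pvOverlay grid p out) out0

-- ===== PRECONDITION & SPEC =====
-- Pre_transform is exactly where the Python A returns: with n = len(grid), A raises
-- IndexError whenever n is even and ≥ 2 (row index center+1+i reaches n), and on odd n
-- whenever an accessed row (rows 0..size-1 paired with rows center+1..n-1) has fewer
-- than n entries.
def Pre_transform (grid : List (List Int)) : Prop :=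
  grid.length ≤ 1 ∨
  (grid.length % 2 = 1 ∧ ∀ i ∈ List.range (grid.length / 2),
    grid.length ≤ (grid.getD i []).length ∧
    grid.length ≤ (grid.getD (grid.length / 2 + 1 + i) []).length)
instance (grid : List (List Int)) : Decidable (Pre_transform grid) := by
  unfold Pre_transform; infer_instance

def pvWitness_transform : List (List Int) := [[0, 9, 2], [0, 0, 0], [3, 0, 4]]

def Spec_transform (grid : List (List Int)) (out : List (List Int)) : Prop := out = transform_alt grid
instance (grid : List (List Int)) (out : List (List Int)) : Decidable (Spec_transform grid out) := by unfold Spec_transform; infer_instance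

-- ===== CLAIM (what is proved, stated in full; the proofs are below) =====
def Claim_equal_transform : Prop := ∀ (grid : List (List Int)), Dom_transform grid → Pre_transform grid → Spec_transform grid (transform grid)

-- ===== LEMMAS AND PROOFS =====

-- first nonzero of (tl, tr, bl, br), 0 if all four are zero: what both programs put at (i, j)
def pvPick (grid : List (List Int)) (c i j : Nat) : Int :=
  let tl := pvG2 grid i j
  let tr := pvG2 grid i ((c : Int) + 1 + j)
  let bl := pvG2 grid ((c : Int) + 1 + i) j
  let br := pvG2 grid ((c : Int) + 1 + i) ((c : Int) + 1 + j)
  if tl ≠ 0 then tl else if tr ≠ 0 then tr else if bl ≠ 0 then bl else br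

-- the common canonical form of the result
def pvF (grid : List (List Int)) (c s : Nat) : List (List Int) :=
  (List.range s).map (fun i => (List.range s).map (fun j => pvPick grid c i j))

lemma pvInner_eq (grid : List (List Int)) (c i j : Nat) (out : List (List Int)) :
    pvInner grid c i out j =
      if pvPick grid c i j ≠ 0 then out.modify i (fun row => row.set j (pvPick grid c i j))
      else out := by
  unfold pvInner pvPick
  by_cases h1 : pvG2 grid i j = 0 <;>
  by_cases h2 : pvG2 grid i ((c : Int) + 1 + j) = 0 <;>
  by_cases h3 : pvG2 grid ((c : Int) + 1 + i) j = 0 <;>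
  by_cases h4 : pvG2 grid ((c : Int) + 1 + i) ((c : Int) + 1 + j) = 0 <;>
  simp [List.find?, h1, h2, h3, h4]

lemma pvRow (grid : List (List Int)) (c i : Nat) :
    ∀ (m s' : Nat) (out : List (List Int)), m ≤ s' → i < out.length →
      out[i]? = some (List.replicate s' (0 : Int)) →
      (List.range m).foldl (pvInner grid c i) out =
        out.set i ((List.range m).map (fun j => pvPick grid c i j) ++
          List.replicate (s' - m) 0) := by
  intro m
  induction m with
  | zero =>
    intro s' out _ hi hget
    have hv : out[i] = List.replicate s' (0 : Int) := by
      rw [List.getElem?_eq_getElem hi] at hget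
      exact Option.some.inj hget
    simp only [List.range_zero, List.foldl_nil, List.map_nil, List.nil_append, Nat.sub_zero]
    rw [← hv, List.set_getElem_self hi]
  | succ m ih =>
    intro s' out hm hi hget
    rw [List.range_succ, List.foldl_append, ih s' out (by omega) hi hget]
    simp only [List.foldl_cons, List.foldl_nil]
    rw [pvInner_eq]
    have h1 : s' - m = (s' - (m + 1)) + 1 := by omega
    have hsplit : List.replicate (s' - m) (0 : Int) =
        0 :: List.replicate (s' - (m + 1)) 0 := by
      rw [h1, List.replicate_succ]
    have hkey : ((List.range m).map (fun j => pvPick grid c i j) ++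
          List.replicate (s' - m) (0 : Int)).set m (pvPick grid c i m) =
        (List.range (m + 1)).map (fun j => pvPick grid c i j) ++
          List.replicate (s' - (m + 1)) 0 := by
      rw [hsplit, List.range_succ, List.map_append]
      have hlen : ((List.range m).map (fun j => pvPick grid c i j)).length = m := by simp
      rw [← hlen]
      simp
    by_cases hp : pvPick grid c i m = 0
    · rw [if_neg (by simpa using hp), ← List.range_succ, ← hkey, hp, hsplit]
      have hlen : ((List.range m).map (fun j => pvPick grid c i j)).length = m := by simp
      rw [← hlen]
      simp
    · rw [if_pos hp]
      rw [List.modify_eq_set]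
      rw [List.getElem?_set_self hi]
      simp only [Option.getD_some]
      rw [List.set_set, hkey, List.range_succ]

lemma pvOuterAll (grid : List (List Int)) (c : Nat) :
    ∀ m : Nat, m ≤ c →
      (List.range m).foldl (pvOuter grid c) (List.replicate c (List.replicate c (0 : Int))) =
        (List.range m).map (fun i => (List.range c).map (fun j => pvPick grid c i j)) ++
          List.replicate (c - m) (List.replicate c 0) := by
  intro m
  induction m with
  | zero => simp
  | succ m ih =>
    intro hm
    rw [List.range_succ, List.foldl_append, ih (by omega)]
    simp only [List.foldl_cons, List.foldl_nil]
    unfold pvOuter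
    have hplen : ((List.range m).map
        (fun i => (List.range c).map (fun j => pvPick grid c i j))).length = m := by simp
    have hlen : ((List.range m).map
        (fun i => (List.range c).map (fun j => pvPick grid c i j)) ++
        List.replicate (c - m) (List.replicate c (0 : Int))).length = c := by
      simp; omega
    have hrep : List.replicate (c - m) (List.replicate c (0 : Int)) =
        List.replicate c 0 :: List.replicate (c - (m + 1)) (List.replicate c 0) := by
      have h1 : c - m = (c - (m + 1)) + 1 := by omega
      rw [h1, List.replicate_succ]
    have hget : ((List.range m).map
        (fun i => (List.range c).map (fun j => pvPick grid c i j)) ++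
        List.replicate (c - m) (List.replicate c (0 : Int)))[m]? =
        some (List.replicate c 0) := by
      rw [List.getElem?_append_right (by omega), hplen, hrep]
      simp
    rw [pvRow grid c m c c _ (le_refl c) (by omega) hget]
    simp only [Nat.sub_self, List.replicate_zero, List.append_nil]
    rw [hrep, List.map_append]
    conv_lhs => rw [← hplen]
    simp

lemma pvA_eq (grid : List (List Int)) :
    transform grid = pvF grid (grid.length / 2) (grid.length / 2) := by
  show (List.range (grid.length / 2)).foldl (pvOuter grid (grid.length / 2))
      ((List.range (grid.length / 2)).map (fun _ => List.replicate (grid.length / 2) (0 : Int))) =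
    pvF grid (grid.length / 2) (grid.length / 2)
  unfold pvF
  have h0 : (List.range (grid.length / 2)).map
      (fun _ => List.replicate (grid.length / 2) (0 : Int)) =
      List.replicate (grid.length / 2) (List.replicate (grid.length / 2) 0) := by
    simp
  rw [h0, pvOuterAll grid (grid.length / 2) (grid.length / 2) (le_refl _)]
  simp

lemma pvEnumMap {α β : Type} [Inhabited α] (l : List α) (g : Int × α → β) :
    (PySem.List.enumerate l).map g =
      (List.range l.length).map (fun (k : Nat) => g ((k : Int), l.getD k default)) := by
  rw [PySem.List.enumerate_eq_map_pyRange l default]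
  simp only [PySem.List.len, PySem.List.pyRange_zero_natCast]
  simp [List.map_map, Function.comp, PySem.List.pyGetD_natCast]

lemma pvOverlay_map (grid : List (List Int)) (p : Int × Int) (s : Nat) (f : Nat → Nat → Int) :
    pvOverlay grid p ((List.range s).map (fun i => (List.range s).map (fun j => f i j))) =
      (List.range s).map (fun i => (List.range s).map (fun j =>
        if f i j ≠ 0 then f i j else pvG2 grid (p.1 + (i : Int)) (p.2 + (j : Int)))) := by
  unfold pvOverlay
  rw [pvEnumMap]
  simp only [List.length_map, List.length_range]
  refine List.map_congr_left ?_
  intro i hi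
  rw [List.mem_range] at hi
  rw [PySem.List.getD_map_range _ _ _ _ hi, pvEnumMap]
  simp only [List.length_map, List.length_range]
  refine List.map_congr_left ?_
  intro j hj
  rw [List.mem_range] at hj
  rw [PySem.List.getD_map_range _ _ _ _ hj]

lemma pvOut0 (grid : List (List Int)) (s : Nat) (h1 : s ≤ grid.length)
    (h2 : ∀ i, i < s → s ≤ (grid.getD i []).length) :
    ((PySem.List.slice grid none (some (s : Int))).map
        (fun row => PySem.List.slice row none (some (s : Int)))) =
      (List.range s).map (fun (i : Nat) => (List.range s).map
        (fun (j : Nat) => pvG2 grid (i : Int) (j : Int))) := by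
  rw [PySem.List.slice_to grid (by positivity)]
  simp only [Int.toNat_natCast]
  apply List.ext_getElem
  · simp; omega
  · intro i hi hi'
    simp only [List.length_map, List.length_range] at hi'
    rw [List.getElem_map, List.getElem_take, List.getElem_map, List.getElem_range]
    have hrow : grid[i] = grid.getD i [] := by
      rw [List.getD_eq_getElem grid [] (by omega)]
    rw [PySem.List.slice_to _ (by positivity)]
    simp only [Int.toNat_natCast]
    apply List.ext_getElem
    · simp only [List.length_take, List.length_map, List.length_range]
      have := h2 i hi'
      rw [hrow]
      omega
    · intro j hj hj'
      simp only [List.length_map, List.length_range] at hj'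
      rw [List.getElem_take, List.getElem_map, List.getElem_range]
      unfold pvG2
      rw [PySem.List.pyGetD_natCast, PySem.List.pyGetD_natCast,
        List.getD_eq_getElem grid [] (by omega : i < grid.length)]
      have hjlt : j < grid[i].length := by
        have := h2 i hi'
        rw [hrow]; omega
      rw [List.getD_eq_getElem _ _ hjlt]

lemma pvB_eq (grid : List (List Int)) (h : Pre_transform grid) :
    transform_alt grid = pvF grid (grid.length / 2) (grid.length / 2) := by
  have h1 : grid.length / 2 ≤ grid.length := Nat.div_le_self _ _
  have h2 : ∀ i, i < grid.length / 2 → grid.length / 2 ≤ (grid.getD i []).length := by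
    intro i hi
    rcases h with hle | ⟨_, hall⟩
    · omega
    · have := (hall i (List.mem_range.mpr hi)).1
      omega
  show ([((0 : Int), ((grid.length / 2 : Nat) : Int) + 1), (((grid.length / 2 : Nat) : Int) + 1, 0),
      (((grid.length / 2 : Nat) : Int) + 1, ((grid.length / 2 : Nat) : Int) + 1)]).foldl
      (fun out p => pvOverlay grid p out)
      ((PySem.List.slice grid none (some ((grid.length / 2 : Nat) : Int))).map
        (fun row => PySem.List.slice row none (some ((grid.length / 2 : Nat) : Int)))) =
    pvF grid (grid.length / 2) (grid.length / 2)
  rw [pvOut0 grid (grid.length / 2) h1 h2]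
  simp only [List.foldl_cons, List.foldl_nil]
  rw [pvOverlay_map, pvOverlay_map, pvOverlay_map]
  unfold pvF
  refine List.map_congr_left ?_
  intro i _
  refine List.map_congr_left ?_
  intro j _
  simp only [zero_add]
  unfold pvPick
  by_cases e1 : pvG2 grid i j = 0 <;>
  by_cases e2 : pvG2 grid i ((grid.length : Int) / 2 + 1 + j) = 0 <;>
  by_cases e3 : pvG2 grid ((grid.length : Int) / 2 + 1 + i) j = 0 <;>
  simp [e1, e2, e3]

-- ===== VERDICT (by name: the statement is the Claim_ definition above) =====
theorem transform_spec : Claim_equal_transform := by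
  intro grid _ hpre
  unfold Spec_transform
  rw [pvA_eq, pvB_eq grid hpre]
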